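-- pv_equiv track=rewrite | github.com/han-peipei/stong | data_3_B_uv_seed_stas2_3_2_1_54641_3d_2_p_tu3/train_3_B.py | get_bins_interval
-- ===== SOURCE A (Python) =====
-- def get_bins_interval(bins):
--     """
--     用于生成左闭右开的区间字符串
--     """
--     freq_bins_left = bins[0:-1] # 左区间
--     freq_bins_right = bins[1:] # 右区间
--     freq_bins_str = []
--     for interval_ind in range(0,len(freq_bins_left)):
--         if (interval_ind == len(freq_bins_left) - 1 ):
--             str_temp = '[' + str(freq_bins_left[interval_ind]) + "," + str(freq_bins_right[interval_ind]) + "]"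
--         else:
--             str_temp = '[' + str(freq_bins_left[interval_ind]) + "," + str(freq_bins_right[interval_ind]) + ")"
--         freq_bins_str.append(str_temp)
--     return freq_bins_str
-- ===== SOURCE B (Python) =====
-- def get_bins_interval(bins):
--     """
--     Build the result back-to-front: pop edge pairs off the right end of a
--     stack, emitting the closed final interval first and the half-open ones
--     after it, then reverse.  No positional check is needed inside the loop.
--     """
--     if len(bins) < 2:
--         return []
--     stack = list(bins)
--     r = stack.pop()
--     l = stack.pop()
--     rev = ['[' + str(l) + ',' + str(r) + ']']
--     while stack:
--         r = l
--         l = stack.pop()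
--         rev.append('[' + str(l) + ',' + str(r) + ')')
--     rev.reverse()
--     return rev
-- ===== Notes on version B (the rewrite author's own statement) =====
-- stated objective: alternative
-- what changed: Replaces the forward indexed loop over two slices with its per-iteration last-index check by a back-to-front build: edge pairs are popped off the right end of a stack, the closed final interval is emitted before the loop, and the accumulated list is reversed at the end.
import Mathlib
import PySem

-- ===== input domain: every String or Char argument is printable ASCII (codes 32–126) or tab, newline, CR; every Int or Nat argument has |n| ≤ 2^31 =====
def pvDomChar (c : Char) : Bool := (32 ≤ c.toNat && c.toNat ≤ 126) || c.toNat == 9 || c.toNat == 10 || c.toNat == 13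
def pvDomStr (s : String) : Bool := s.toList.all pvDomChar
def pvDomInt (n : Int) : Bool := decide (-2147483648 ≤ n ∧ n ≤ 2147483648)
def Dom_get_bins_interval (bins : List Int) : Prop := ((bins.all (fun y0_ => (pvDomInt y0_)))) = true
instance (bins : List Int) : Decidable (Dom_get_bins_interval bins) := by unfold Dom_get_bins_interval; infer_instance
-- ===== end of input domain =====

-- B replaces A's forward indexed loop with its per-iteration last-index check
-- by a back-to-front build: pop edge pairs off the right end, emit the closed
-- interval first, then reverse (objective: alternative).

-- ===== PORT A =====
def get_bins_interval (bins : List Int) : List String :=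
  let freq_bins_left := PySem.List.slice bins (some 0) (some (-1))
  let freq_bins_right := PySem.List.slice bins (some 1) none
  (PySem.List.pyRange 0 freq_bins_left.length 1).foldl (fun freq_bins_str interval_ind =>
    freq_bins_str ++
      [ if interval_ind = (freq_bins_left.length : Int) - 1 then
          "[" ++ PySem.Int.toStr (PySem.List.pyGetD freq_bins_left interval_ind 0) ++ ","
              ++ PySem.Int.toStr (PySem.List.pyGetD freq_bins_right interval_ind 0) ++ "]"
        else
          "[" ++ PySem.Int.toStr (PySem.List.pyGetD freq_bins_left interval_ind 0) ++ ","
              ++ PySem.Int.toStr (PySem.List.pyGetD freq_bins_right interval_ind 0) ++ ")" ]) []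

-- ===== PORT B =====
-- B's while loop; the stack is kept reversed so that Python's pop() from the
-- right end is the head here.
def pvAltLoop (l : Int) (stack : List Int) (rev : List String) : List String :=
  match stack with
  | [] => rev
  | x :: stk =>
      pvAltLoop x stk (rev ++ ["[" ++ PySem.Int.toStr x ++ "," ++ PySem.Int.toStr l ++ ")"])

def get_bins_interval_alt (bins : List Int) : List String :=
  if bins.length < 2 then []
  else
    match bins.reverse with
    | r :: l :: stack =>
        (pvAltLoop l stack
          ["[" ++ PySem.Int.toStr l ++ "," ++ PySem.Int.toStr r ++ "]"]).reverse
    | _ => []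

-- ===== PRECONDITION & SPEC =====
def Spec_get_bins_interval (bins : List Int) (out : List String) : Prop := out = get_bins_interval_alt bins
instance (bins : List Int) (out : List String) : Decidable (Spec_get_bins_interval bins out) := by unfold Spec_get_bins_interval; infer_instance

-- ===== CLAIM (what is proved, stated in full; the proofs are below) =====
def Claim_equal_get_bins_interval : Prop := ∀ (bins : List Int), Dom_get_bins_interval bins → Spec_get_bins_interval bins (get_bins_interval bins)

-- ===== LEMMAS AND PROOFS =====

-- proof-only middle form 1: the zipped-pair map with a closed last element
def pvMapFix (bins : List Int) : List String :=
  let pairs := bins.zip bins.tail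
  let res := pairs.map (fun p => "[" ++ PySem.Int.toStr p.1 ++ "," ++ PySem.Int.toStr p.2 ++ ")")
  if pairs.isEmpty then res
  else
    let p := PySem.List.pyGetD pairs (-1) (0, 0)
    res.dropLast ++ ["[" ++ PySem.Int.toStr p.1 ++ "," ++ PySem.Int.toStr p.2 ++ "]"]

-- proof-only middle form 2: structural recursion on the edge list
def pvRec : List Int → List String
  | [] => []
  | [_] => []
  | [a, b] => ["[" ++ PySem.Int.toStr a ++ "," ++ PySem.Int.toStr b ++ "]"]
  | a :: b :: c :: rest =>
      ("[" ++ PySem.Int.toStr a ++ "," ++ PySem.Int.toStr b ++ ")") :: pvRec (b :: c :: rest)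

theorem pvGetDNegOneCons {α : Type} (x : α) (l : List α) (d : α) (h : l ≠ []) :
    PySem.List.pyGetD (x :: l) (-1) d = PySem.List.pyGetD l (-1) d := by
  rw [PySem.List.pyGetD_neg_one _ _ h, PySem.List.pyGetD_neg_one _ _ (by simp),
    List.getLast_cons h]

theorem get_bins_interval_eq_mapFix (bins : List Int) :
    get_bins_interval bins = pvMapFix bins := by
  unfold get_bins_interval pvMapFix
  simp only [PySem.List.slice_zero_start, PySem.List.slice_to_neg_one, PySem.List.slice_from_one]
  rw [PySem.List.foldl_append_singleton_eq_map, PySem.List.pyRange_one, List.nil_append]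
  simp only [Int.sub_zero, Int.toNat_natCast]
  by_cases h : bins.zip bins.tail = []
  · have h0 : bins.dropLast.length = 0 := by
      have := congrArg List.length h
      simp [List.length_zip, List.length_tail] at this
      simp only [List.length_dropLast]
      omega
    simp [h, h0]
  · rw [if_neg (by simpa [List.isEmpty_iff] using h)]
    have hlen : (bins.zip bins.tail).length = bins.dropLast.length := by
      simp [List.length_zip, List.length_dropLast, List.length_tail]
    have hb : 2 ≤ bins.length := by
      have := List.length_pos_of_ne_nil h
      simp [List.length_zip, List.length_tail] at this
      omega
    apply List.ext_getElem
    · simp [hlen, List.length_dropLast]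
      omega
    · intro k h1 h2
      have hk : k < bins.dropLast.length := by simpa using h1
      have hk' : bins.dropLast.length = bins.length - 1 := by simp
      have ht : k < bins.tail.length := by simp [List.length_tail]; omega
      simp only [List.getElem_map, List.getElem_range, zero_add]
      by_cases hkl : k = bins.dropLast.length - 1
      · rw [if_pos (by omega)]
        rw [List.getElem_append_right (by simp [List.length_dropLast, List.length_map, hlen]; omega)]
        have hz : k - ((bins.zip bins.tail).map (fun p => "[" ++ PySem.Int.toStr p.1 ++ "," ++ PySem.Int.toStr p.2 ++ ")")).dropLast.length = 0 := by
          simp [List.length_dropLast, List.length_map, hlen]; omega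
        simp only [hz, List.getElem_cons_zero]
        rw [PySem.List.pyGetD_neg_one _ _ h, List.getLast_eq_getElem]
        have hidx : (bins.zip bins.tail).length - 1 = k := by omega
        simp only [hidx, List.getElem_zip, PySem.List.pyGetD_natCast]
        rw [List.getD_eq_getElem _ _ hk, List.getD_eq_getElem _ _ ht]
        simp only [List.getElem_dropLast, List.getElem_tail]
      · rw [if_neg (by omega)]
        rw [List.getElem_append_left (by simp [List.length_dropLast, List.length_map, hlen]; omega)]
        rw [List.getElem_dropLast]
        simp only [List.getElem_map, List.getElem_zip, PySem.List.pyGetD_natCast]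
        rw [List.getD_eq_getElem _ _ hk, List.getD_eq_getElem _ _ ht]
        simp only [List.getElem_dropLast, List.getElem_tail]

theorem mapFix_eq_rec : ∀ (bins : List Int), pvMapFix bins = pvRec bins
  | [] => by simp [pvMapFix, pvRec]
  | [_] => by simp [pvMapFix, pvRec]
  | [a, b] => by
      simp [pvMapFix, pvRec, PySem.List.pyGetD_neg_one]
  | a :: b :: c :: rest => by
      have ih := mapFix_eq_rec (b :: c :: rest)
      have hz : (b :: c :: rest).zip (c :: rest) ≠ [] := by simp
      unfold pvMapFix at ih ⊢
      simp only [List.tail_cons, List.zip_cons_cons, List.map_cons, List.isEmpty_cons,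
        Bool.false_eq_true, if_false] at ih ⊢
      rw [List.dropLast_cons₂, pvGetDNegOneCons _ _ _ (by simp), List.cons_append, ih,
        pvRec]

-- the while loop with one more element at the bottom of the stack
theorem pvAltLoop_append (a : Int) : ∀ (l : Int) (stk : List Int) (acc : List String),
    pvAltLoop l (stk ++ [a]) acc
      = pvAltLoop l stk acc
          ++ ["[" ++ PySem.Int.toStr a ++ "," ++ PySem.Int.toStr (stk.getLastD l) ++ ")"]
  | l, [], acc => by simp [pvAltLoop]
  | l, x :: stk, acc => by
      rw [List.cons_append, pvAltLoop, pvAltLoop_append a x stk, pvAltLoop]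
      cases stk <;> simp [List.getLastD, List.getLast_cons]

-- head of a reversed nonempty list is its last element, in getLastD form
theorem pvHeadRevLastD : ∀ (s : List Int) (l : Int),
    ((l :: s).reverse).head? = some (s.getLastD l)
  | [], l => rfl
  | x :: s, l => by
      have ih := pvHeadRevLastD s x
      rw [show (l :: x :: s).reverse = (x :: s).reverse ++ [l] by simp]
      rw [List.head?_append, ih]
      cases s <;> simp [List.getLastD]

theorem alt_cons (a b c : Int) (rest : List Int) :
    get_bins_interval_alt (a :: b :: c :: rest)
      = ("[" ++ PySem.Int.toStr a ++ "," ++ PySem.Int.toStr b ++ ")")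
          :: get_bins_interval_alt (b :: c :: rest) := by
  rcases ht : (b :: c :: rest).reverse with _ | ⟨r, _ | ⟨l, stk⟩⟩
  · exact absurd (congrArg List.length ht) (by simp)
  · exact absurd (congrArg List.length ht) (by simp)
  · have hrev : (a :: b :: c :: rest).reverse = r :: l :: (stk ++ [a]) := by
      rw [show (a :: b :: c :: rest) = a :: (b :: c :: rest) from rfl, List.reverse_cons, ht]
      simp
    have hlast : stk.getLastD l = b := by
      have hb := congrArg List.head? (congrArg List.reverse ht)
      rw [List.reverse_reverse] at hb
      rw [show (r :: l :: stk).reverse = (l :: stk).reverse ++ [r] by simp,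
        List.head?_append, pvHeadRevLastD] at hb
      simpa using hb.symm
    unfold get_bins_interval_alt
    simp only [List.length_cons]
    rw [if_neg (by omega), if_neg (by omega), hrev, ht]
    show (pvAltLoop l (stk ++ [a]) _).reverse = _ :: (pvAltLoop l stk _).reverse
    rw [pvAltLoop_append, hlast]
    simp

theorem rec_eq_alt : ∀ (bins : List Int), pvRec bins = get_bins_interval_alt bins
  | [] => by simp [pvRec, get_bins_interval_alt]
  | [_] => by simp [pvRec, get_bins_interval_alt]
  | [a, b] => by simp [pvRec, get_bins_interval_alt, pvAltLoop]
  | a :: b :: c :: rest => by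
      rw [pvRec, rec_eq_alt (b :: c :: rest), ← alt_cons]

-- ===== VERDICT (by name: the statement is the Claim_ definition above) =====
theorem get_bins_interval_spec : Claim_equal_get_bins_interval := by
  intro bins _
  exact ((get_bins_interval_eq_mapFix bins).trans (mapFix_eq_rec bins)).trans (rec_eq_alt bins)
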